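-- pv_equiv track=rewrite | github.com/Netal-Rathi/Labeling-Algorithm | main.py | infix_to_tac
-- ===== SOURCE A (Python) =====
-- def precedence(op):
--     if op in ['*', '/']:
--         return 2
--     elif op in ['+', '-']:
--         return 1
--     return 0
--
-- def infix_to_tac(expression):
--     expression = expression.replace(" ", "")
--     tokens = []
--     i = 0
--     while i < len(expression):
--         if expression[i] in '+-*/()':
--             tokens.append(expression[i])
--             i += 1
--         else:
--             j = i
--             while j < len(expression) and expression[j] not in '+-*/()':
--                 j += 1
--             tokens.append(expression[i:j])
--             i = j
--
--     temp_count = 1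
--     tac = []
--     stack = []
--     op_stack = []
--
--     for token in tokens:
--         if token not in '+-*/()':
--             stack.append(token)
--         elif token == '(':
--             op_stack.append(token)
--         elif token == ')':
--             while op_stack[-1] != '(':
--                 op = op_stack.pop()
--                 right = stack.pop()
--                 left = stack.pop()
--                 temp_var = f't{temp_count}'
--                 temp_count += 1
--                 tac.append(f"{temp_var} = {left} {op} {right}")
--                 stack.append(temp_var)
--             op_stack.pop()
--         else:
--             while (op_stack and op_stack[-1] != '(' and
--                    precedence(op_stack[-1]) >= precedence(token)):
--                 op = op_stack.pop()
--                 right = stack.pop()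
--                 left = stack.pop()
--                 temp_var = f't{temp_count}'
--                 temp_count += 1
--                 tac.append(f"{temp_var} = {left} {op} {right}")
--                 stack.append(temp_var)
--             op_stack.append(token)
--
--     while op_stack:
--         op = op_stack.pop()
--         right = stack.pop()
--         left = stack.pop()
--         temp_var = f't{temp_count}'
--         temp_count += 1
--         tac.append(f"{temp_var} = {left} {op} {right}")
--         stack.append(temp_var)
--
--     if '=' in expression:
--         var_part, expr_part = expression.split('=')
--         tac.append(f"{var_part} = {stack[-1]}")
--
--     return tac
-- ===== SOURCE B (Python) =====
-- def infix_to_tac(expression):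
--     expression = expression.replace(" ", "")
--     tokens = []
--     i = 0
--     while i < len(expression):
--         if expression[i] in '+-*/()':
--             tokens.append(expression[i])
--             i += 1
--         else:
--             j = i
--             while j < len(expression) and expression[j] not in '+-*/()':
--                 j += 1
--             tokens.append(expression[i:j])
--             i = j
--
--     pos = 0
--     temp = 1
--     tac = []
--
--     def advance():
--         nonlocal pos
--         if pos >= len(tokens):
--             raise SyntaxError("unexpected end of expression")
--         t = tokens[pos]
--         pos += 1
--         return t
--
--     def peek():
--         return tokens[pos] if pos < len(tokens) else None
--
--     def emit(left, op, right):
--         nonlocal temp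
--         name = f't{temp}'
--         temp += 1
--         tac.append(f"{name} = {left} {op} {right}")
--         return name
--
--     def parse_factor():
--         t = advance()
--         if t == '(':
--             r = parse_expr()
--             if advance() != ')':
--                 raise SyntaxError("expected ')'")
--             return r
--         if t in ('+', '-', '*', '/', ')'):
--             raise SyntaxError("unexpected " + t)
--         return t
--
--     def parse_term():
--         left = parse_factor()
--         while peek() in ('*', '/'):
--             op = advance()
--             left = emit(left, op, parse_factor())
--         return left
--
--     def parse_expr():
--         left = parse_term()
--         while peek() in ('+', '-'):
--             op = advance()
--             left = emit(left, op, parse_term())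
--         return left
--
--     result = None
--     if tokens:
--         result = parse_expr()
--         if pos != len(tokens):
--             raise SyntaxError("trailing tokens")
--
--     if '=' in expression:
--         var_part, expr_part = expression.split('=')
--         tac.append(f"{var_part} = {result}")
--     return tac
-- ===== Notes on version B (the rewrite author's own statement) =====
-- stated objective: alternative
-- what changed: Replaces the two-stack shunting-yard evaluator with a recursive-descent parser (parse_expr/parse_term/parse_factor over the token list) that emits each three-address line in postorder as sub-results combine; the tokenizer and the trailing assignment logic are kept.
-- outside the precondition, e.g. on infix_to_tac('a(b'): A returns ['t1 = a ( b'], B raises SyntaxError; on infix_to_tac('(a)(b)'): A returns [], B raises SyntaxError; on infix_to_tac('a+'): A raises IndexError, B raises SyntaxError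
import Mathlib
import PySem

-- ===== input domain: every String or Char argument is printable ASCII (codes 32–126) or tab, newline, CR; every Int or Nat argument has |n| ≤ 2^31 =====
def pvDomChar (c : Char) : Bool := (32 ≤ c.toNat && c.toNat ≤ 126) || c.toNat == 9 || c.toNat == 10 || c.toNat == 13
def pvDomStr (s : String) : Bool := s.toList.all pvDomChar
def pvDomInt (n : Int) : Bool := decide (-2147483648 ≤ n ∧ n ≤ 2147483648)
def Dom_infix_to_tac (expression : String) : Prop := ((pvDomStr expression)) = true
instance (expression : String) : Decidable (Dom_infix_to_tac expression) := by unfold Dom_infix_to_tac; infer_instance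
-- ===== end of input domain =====

-- B replaces A's two-stack shunting-yard evaluator by a recursive-descent parser that emits
-- the same three-address lines in postorder (objective: alternative; same cost).

-- ===== PORT A =====
-- tokenizer helpers (the tokenizer code is textually identical in Source A and Source B, so it is shared)
def pvSpecialChar (c : Char) : Bool :=
  c = '+' || c = '-' || c = '*' || c = '/' || c = '(' || c = ')'

-- expression.replace(" ", "")
def pvStrip (s : String) : List Char := s.toList.filter (fun c => c ≠ ' ')

-- the while-loop tokenizer: a special char is its own token, a maximal special-free run is one token
def pvTokenize : List Char → List String
  | [] => []
  | c :: rest =>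
    if pvSpecialChar c then String.ofList [c] :: pvTokenize rest
    else
      String.ofList (c :: rest.takeWhile (fun d => !pvSpecialChar d)) ::
        pvTokenize (rest.dropWhile (fun d => !pvSpecialChar d))
termination_by l => l.length
decreasing_by
  · simp
  · have h := List.length_dropWhile_le (fun d => !pvSpecialChar d) rest
    simp; omega

-- `token in '+-*/()'`: exact for tokenizer output (a token is a single special char or a
-- nonempty special-free run, so the Python substring test is plain membership here)
def pvIsOpTok (t : String) : Bool :=
  t = "+" || t = "-" || t = "*" || t = "/" || t = "(" || t = ")"

def pvPrec (op : String) : Nat :=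
  if op = "*" || op = "/" then 2 else if op = "+" || op = "-" then 1 else 0

def pvTempName (n : Nat) : String := "t" ++ toString n

-- the three identical `while … : op = op_stack.pop(); …` loops of A, parametrised by the guard;
-- when fewer than two operands are on the stack Python raises IndexError (excluded by Pre_)
def pvReduce (p : String → Bool) :
    List String → List String → Nat → List String →
    List String × List String × Nat × List String
  | [], stack, temp, tac => ([], stack, temp, tac)
  | op :: ops, stack, temp, tac =>
    if p op then
      match stack with
      | right :: left :: s =>
          pvReduce p ops (pvTempName temp :: s) (temp + 1)
            (tac ++ [pvTempName temp ++ " = " ++ left ++ " " ++ op ++ " " ++ right])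
      | _ => (op :: ops, stack, temp, tac)
    else (op :: ops, stack, temp, tac)

-- the body of A's `for token in tokens` loop; state is (stack, op_stack, temp_count, tac)
def pvSyStep : (List String × List String × Nat × List String) → String →
    (List String × List String × Nat × List String)
  | (stack, ops, temp, tac), token =>
    if ¬ pvIsOpTok token then (token :: stack, ops, temp, tac)
    else if token = "(" then (stack, token :: ops, temp, tac)
    else if token = ")" then
      match pvReduce (fun op => decide (op ≠ "(")) ops stack temp tac with
      | (ops', stack', temp', tac') => (stack', ops'.tail, temp', tac')  -- `.tail` = the pop of '('; empty only where Python raised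
    else
      match pvReduce (fun op => decide (op ≠ "(") && decide (pvPrec token ≤ pvPrec op)) ops stack temp tac with
      | (ops', stack', temp', tac') => (stack', token :: ops', temp', tac')

def infix_to_tac (expression : String) : List String :=
  let e := pvStrip expression
  let tokens := pvTokenize e
  match tokens.foldl pvSyStep ([], [], 1, []) with
  | (stack, ops, temp, tac) =>
    match pvReduce (fun _ => true) ops stack temp tac with
    | (_, stack', _, tac') =>
      if e.contains '=' then
        -- split('='): Pre_ guarantees at most one '=', so var_part is everything before it
        tac' ++ [String.ofList (e.takeWhile (fun c => c ≠ '=')) ++ " = " ++ stack'.headD ""]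
      else tac'

-- ===== PORT B =====
-- recursive-descent parser of Source B; fuel only makes the mutual recursion total
-- (3*|tokens|+3 always suffices, see pvCompE below); `none` = Source B raises SyntaxError
mutual
def pvParseF : Nat → List String → Nat → List String →
    Option (String × List String × Nat × List String)
  | 0, _, _, _ => none
  | n+1, ts, temp, tac =>
    match ts with
    | [] => none
    | t :: rest =>
      if t = "(" then
        match pvParseE n rest temp tac with
        | some (r, rest', temp', tac') =>
          match rest' with
          | c :: rest'' => if c = ")" then some (r, rest'', temp', tac') else none
          | [] => none
        | none => none
      else if t = "+" || t = "-" || t = "*" || t = "/" || t = ")" then none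
      else some (t, rest, temp, tac)

def pvParseT : Nat → List String → Nat → List String →
    Option (String × List String × Nat × List String)
  | 0, _, _, _ => none
  | n+1, ts, temp, tac =>
    match pvParseF n ts temp tac with
    | some (left, rest, temp', tac') => pvParseTLoop n left rest temp' tac'
    | none => none

def pvParseTLoop : Nat → String → List String → Nat → List String →
    Option (String × List String × Nat × List String)
  | 0, _, _, _, _ => none
  | n+1, left, ts, temp, tac =>
    match ts with
    | op :: rest =>
      if op = "*" || op = "/" then
        match pvParseF n rest temp tac with
        | some (right, rest', temp', tac') =>
            pvParseTLoop n (pvTempName temp') rest' (temp' + 1)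
              (tac' ++ [pvTempName temp' ++ " = " ++ left ++ " " ++ op ++ " " ++ right])
        | none => none
      else some (left, ts, temp, tac)
    | [] => some (left, ts, temp, tac)

def pvParseE : Nat → List String → Nat → List String →
    Option (String × List String × Nat × List String)
  | 0, _, _, _ => none
  | n+1, ts, temp, tac =>
    match pvParseT n ts temp tac with
    | some (left, rest, temp', tac') => pvParseELoop n left rest temp' tac'
    | none => none

def pvParseELoop : Nat → String → List String → Nat → List String →
    Option (String × List String × Nat × List String)
  | 0, _, _, _, _ => none
  | n+1, left, ts, temp, tac =>
    match ts with
    | op :: rest =>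
      if op = "+" || op = "-" then
        match pvParseT n rest temp tac with
        | some (right, rest', temp', tac') =>
            pvParseELoop n (pvTempName temp') rest' (temp' + 1)
              (tac' ++ [pvTempName temp' ++ " = " ++ left ++ " " ++ op ++ " " ++ right])
        | none => none
      else some (left, ts, temp, tac)
    | [] => some (left, ts, temp, tac)
end

def infix_to_tac_alt (expression : String) : List String :=
  let e := pvStrip expression
  let tokens := pvTokenize e
  match tokens with
  | [] => []                                    -- result stays None; an all-space input has no '=', tac = []
  | _ =>
    match pvParseE (3 * tokens.length + 3) tokens 1 [] with
    | some (res, rest, _, tac) =>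
      if rest.isEmpty then
        if e.contains '=' then
          tac ++ [String.ofList (e.takeWhile (fun c => c ≠ '=')) ++ " = " ++ res]
        else tac
      else []                                   -- Source B raises SyntaxError (outside Pre_)
    | none => []                                -- Source B raises SyntaxError (outside Pre_)

-- ===== PRECONDITION & SPEC =====
-- shape check for Pre_: operands/operators alternate correctly and parentheses balance,
-- read off the stripped characters by a 3-state automaton
-- (state: 0 = expecting an operand, 1 = inside an operand, 2 = just after ')'; × paren depth)
def pvCheckChar : Option (Nat × Nat) → Char → Option (Nat × Nat)
  | none, _ => none
  | some (st, d), c =>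
    if st = 0 then
      if c = '(' then some (0, d + 1)
      else if pvSpecialChar c then none
      else some (1, d)
    else
      if pvSpecialChar c then
        if c = ')' then (if d = 0 then none else some (2, d - 1))
        else if c = '(' then none
        else some (0, d)
      else if st = 1 then some (1, d) else none

def pvToTok : Option (Nat × Nat) → Option (Bool × Nat)
  | none => none
  | some (st, d) => some (st == 0, d)

-- Pre_ excludes malformed expressions (unbalanced parentheses, missing operands, more than one
-- equals sign): on those A raises IndexError/ValueError or returns accidental output of its
-- stack leftovers (e.g. it can emit an unmatched opening parenthesis as if it were a binary
-- operator), while B's parser raises SyntaxError there.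
def Pre_infix_to_tac (expression : String) : Prop :=
  let e := pvStrip expression
  e.count '=' ≤ 1 ∧
  (e = [] ∨ pvToTok (e.foldl pvCheckChar (some (0, 0))) = some (false, 0))

instance (expression : String) : Decidable (Pre_infix_to_tac expression) := by
  unfold Pre_infix_to_tac; infer_instance

def pvWitness_infix_to_tac : String := "x = a + b*(c-d)"

def Spec_infix_to_tac (expression : String) (out : List String) : Prop := out = infix_to_tac_alt expression
instance (expression : String) (out : List String) : Decidable (Spec_infix_to_tac expression out) := by unfold Spec_infix_to_tac; infer_instance

-- ===== CLAIM (what is proved, stated in full; the proofs are below) =====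
def Claim_equal_infix_to_tac : Prop := ∀ (expression : String), Dom_infix_to_tac expression → Pre_infix_to_tac expression → Spec_infix_to_tac expression (infix_to_tac expression)

-- ===== LEMMAS AND PROOFS =====

-- ---- side conditions used by the simulation invariant ----
def pvMul (o : String) : Prop := o = "*" ∨ o = "/"
def pvAnyOp (o : String) : Prop := o = "+" ∨ o = "-" ∨ o = "*" ∨ o = "/"
-- what may sit on top of A's op_stack when a term / an expression starts
def pvOkT (ops : List String) : Prop :=
  ops = [] ∨ ∃ o t, ops = o :: t ∧ (o = "(" ∨ o = "+" ∨ o = "-")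
def pvOkE (ops : List String) : Prop := ops = [] ∨ ∃ t, ops = "(" :: t

-- draining a pending block on top of the two stacks = continuing below it
theorem pvReduce_extend (p : String → Bool) :
    ∀ (pendO pendS stack ops : List String) (tA tR : Nat) (tacA tacR : List String) (res : String),
    (∀ o ∈ pendO, p o = true) →
    pendS.length = pendO.length + 1 →
    pvReduce (fun _ => true) pendO pendS tA tacA = ([], [res], tR, tacR) →
    pvReduce p (pendO ++ ops) (pendS ++ stack) tA tacA = pvReduce p ops (res :: stack) tR tacR := by
  intro pendO
  induction pendO with
  | nil =>
    intro pendS stack ops tA tR tacA tacR res _ hlen hred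
    match pendS, hlen with
    | [x], h =>
      simp [pvReduce] at hred
      obtain ⟨h1, h2, h3⟩ := hred
      subst h1; subst h2; subst h3
      simp
  | cons op pendO ih =>
    intro pendS stack ops tA tR tacA tacR res hp hlen hred
    match pendS, hlen with
    | a :: b :: ps, h =>
      have hpop : p op = true := hp op (by simp)
      simp [pvReduce, hpop] at hred ⊢
      exact ih (pvTempName tA :: ps) stack ops (tA + 1) tR
        (tacA ++ [pvTempName tA ++ " = " ++ b ++ " " ++ op ++ " " ++ a]) tacR res
        (fun o ho => hp o (by simp [ho])) (by simp at h ⊢; omega) hred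

-- ---- small step lemmas about A's loop body ----
theorem pvSyStep_operand (t : String) (h : pvIsOpTok t = false)
    (stack ops : List String) (temp : Nat) (tac : List String) :
    pvSyStep (stack, ops, temp, tac) t = (t :: stack, ops, temp, tac) := by
  simp [pvSyStep, h]

theorem pvSyStep_lparen (stack ops : List String) (temp : Nat) (tac : List String) :
    pvSyStep (stack, ops, temp, tac) "(" = (stack, "(" :: ops, temp, tac) := by
  simp [pvSyStep, pvIsOpTok]

theorem pvSyStep_rparen {stack ops o' s' : List String} {temp t' : Nat} {tac c' : List String}
    (h : pvReduce (fun op => !decide (op = "(")) ops stack temp tac = (o', s', t', c')) :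
    pvSyStep (stack, ops, temp, tac) ")" = (s', o'.tail, t', c') := by
  simp [pvSyStep, pvIsOpTok, h]

theorem pvSyStep_binop {token : String} (hop : pvAnyOp token)
    {stack ops o' s' : List String} {temp t' : Nat} {tac c' : List String}
    (h : pvReduce (fun op => !decide (op = "(") && decide (pvPrec token ≤ pvPrec op)) ops stack temp tac
          = (o', s', t', c')) :
    pvSyStep (stack, ops, temp, tac) token = (s', token :: o', t', c') := by
  rcases hop with rfl | rfl | rfl | rfl <;> simp [pvSyStep, pvIsOpTok, h]

theorem pvReduce_stop (p : String → Bool) (ops stack : List String) (temp : Nat) (tac : List String)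
    (h : ops = [] ∨ ∃ o t, ops = o :: t ∧ p o = false) :
    pvReduce p ops stack temp tac = (ops, stack, temp, tac) := by
  rcases h with rfl | ⟨o, t, rfl, hf⟩
  · rfl
  · simp [pvReduce, hf]

-- ---- simulation: a successful recursive-descent parse determines A's loop state ----
theorem pvSim : ∀ n : Nat,
    (∀ ts temp tac res rest tR tacR stack ops,
      pvParseF n ts temp tac = some (res, rest, tR, tacR) →
      ∃ C, ts = C ++ rest ∧
        List.foldl pvSyStep (stack, ops, temp, tac) C = (res :: stack, ops, tR, tacR)) ∧
    (∀ left ts temp tac res rest tR tacR stack ops pendS pendO tA tacA,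
      pvParseTLoop n left ts temp tac = some (res, rest, tR, tacR) →
      pvOkT ops → (∀ o ∈ pendO, pvMul o) → pendS.length = pendO.length + 1 →
      pvReduce (fun _ => true) pendO pendS tA tacA = ([], [left], temp, tac) →
      ∃ C pendS' pendO' tA' tacA', ts = C ++ rest ∧
        List.foldl pvSyStep (pendS ++ stack, pendO ++ ops, tA, tacA) C
          = (pendS' ++ stack, pendO' ++ ops, tA', tacA') ∧
        (∀ o ∈ pendO', pvMul o) ∧ pendS'.length = pendO'.length + 1 ∧
        pvReduce (fun _ => true) pendO' pendS' tA' tacA' = ([], [res], tR, tacR)) ∧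
    (∀ ts temp tac res rest tR tacR stack ops,
      pvParseT n ts temp tac = some (res, rest, tR, tacR) → pvOkT ops →
      ∃ C pendS pendO tA tacA, ts = C ++ rest ∧
        List.foldl pvSyStep (stack, ops, temp, tac) C = (pendS ++ stack, pendO ++ ops, tA, tacA) ∧
        (∀ o ∈ pendO, pvMul o) ∧ pendS.length = pendO.length + 1 ∧
        pvReduce (fun _ => true) pendO pendS tA tacA = ([], [res], tR, tacR)) ∧
    (∀ left ts temp tac res rest tR tacR stack ops pendS pendO tA tacA,
      pvParseELoop n left ts temp tac = some (res, rest, tR, tacR) →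
      pvOkE ops → (∀ o ∈ pendO, pvAnyOp o) → pendS.length = pendO.length + 1 →
      pvReduce (fun _ => true) pendO pendS tA tacA = ([], [left], temp, tac) →
      ∃ C pendS' pendO' tA' tacA', ts = C ++ rest ∧
        List.foldl pvSyStep (pendS ++ stack, pendO ++ ops, tA, tacA) C
          = (pendS' ++ stack, pendO' ++ ops, tA', tacA') ∧
        (∀ o ∈ pendO', pvAnyOp o) ∧ pendS'.length = pendO'.length + 1 ∧
        pvReduce (fun _ => true) pendO' pendS' tA' tacA' = ([], [res], tR, tacR)) ∧
    (∀ ts temp tac res rest tR tacR stack ops,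
      pvParseE n ts temp tac = some (res, rest, tR, tacR) → pvOkE ops →
      ∃ C pendS pendO tA tacA, ts = C ++ rest ∧
        List.foldl pvSyStep (stack, ops, temp, tac) C = (pendS ++ stack, pendO ++ ops, tA, tacA) ∧
        (∀ o ∈ pendO, pvAnyOp o) ∧ pendS.length = pendO.length + 1 ∧
        pvReduce (fun _ => true) pendO pendS tA tacA = ([], [res], tR, tacR)) := by
  intro n
  induction n with
  | zero =>
    refine ⟨?_, ?_, ?_, ?_, ?_⟩ <;> intros <;> simp_all [pvParseF, pvParseT, pvParseTLoop, pvParseE, pvParseELoop]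
  | succ n ih =>
    obtain ⟨ihF, ihTL, ihT, ihEL, ihE⟩ := ih
    refine ⟨?_, ?_, ?_, ?_, ?_⟩
    · -- parseF
      intro ts temp tac res rest tR tacR stack ops h
      match ts with
      | [] => simp [pvParseF] at h
      | t :: rest₀ =>
        by_cases ht : t = "("
        · subst ht
          simp only [pvParseF] at h
          cases hE : pvParseE n rest₀ temp tac with
          | none => rw [hE] at h; simp at h
          | some q =>
            obtain ⟨r, rest', temp', tac'⟩ := q
            rw [hE] at h
            match rest' with
            | [] => simp at h
            | c :: rest'' =>
              by_cases hc : c = ")"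
              · subst hc
                rcases h with ⟨rfl, rfl, rfl, rfl⟩
                obtain ⟨C₁, pendS, pendO, tA, tacA, hsplit, hfold, hany, hlen, hdrain⟩ :=
                  ihE _ _ _ _ _ _ _ stack ("(" :: ops) hE (Or.inr ⟨ops, rfl⟩)
                have hq : ∀ o ∈ pendO, (!decide (o = "(")) = true := by
                  intro o ho; rcases hany o ho with rfl | rfl | rfl | rfl <;> decide
                have hext := pvReduce_extend (fun o => !decide (o = "(")) pendO pendS stack
                  ("(" :: ops) _ _ _ _ _ hq hlen hdrain
                have hstop := pvReduce_stop (fun o => !decide (o = "(")) ("(" :: ops)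
                    (res :: stack) tR tacR (Or.inr ⟨"(", ops, rfl, by decide⟩)
                refine ⟨"(" :: (C₁ ++ [")"]), ?_, ?_⟩
                · simp [hsplit]
                · rw [List.foldl_cons, pvSyStep_lparen, List.foldl_append, hfold,
                    List.foldl_cons, List.foldl_nil,
                    pvSyStep_rparen (by rw [hext, hstop])]
                  simp
              · simp [hc] at h
        · by_cases hop : (t = "+" || t = "-" || t = "*" || t = "/" || t = ")") = true
          · simp [pvParseF, ht, hop] at h
          · simp only [pvParseF, if_neg ht, hop, Bool.false_eq_true, if_false,
              Option.some.injEq, Prod.mk.injEq] at h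
            rcases h with ⟨rfl, rfl, rfl, rfl⟩
            have hIs : pvIsOpTok t = false := by
              simp at hop; simp [pvIsOpTok, ht]; tauto
            exact ⟨[t], by simp, by rw [List.foldl_cons, pvSyStep_operand t hIs, List.foldl_nil]⟩
    · -- parseTLoop
      intro left ts temp tac res rest tR tacR stack ops pendS pendO tA tacA h hOk hmul hlen hdrain
      match ts with
      | [] =>
        simp [pvParseTLoop] at h
        rcases h with ⟨rfl, rfl, rfl, rfl⟩
        exact ⟨[], pendS, pendO, tA, tacA, by simp, by simp, hmul, hlen, hdrain⟩
      | op :: rest₀ =>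
        by_cases hop : (op = "*" || op = "/") = true
        · have hop' : op = "*" ∨ op = "/" := by simpa using hop
          simp only [pvParseTLoop, hop, if_true] at h
          cases hF : pvParseF n rest₀ temp tac with
          | none => rw [hF] at h; simp at h
          | some q =>
            obtain ⟨right, rest', temp', tac'⟩ := q
            rw [hF] at h
            have hopAny : pvAnyOp op := by rcases hop' with rfl | rfl <;> simp [pvAnyOp]
            have hq : ∀ o ∈ pendO, (!decide (o = "(") && decide (pvPrec op ≤ pvPrec o)) = true := by
              intro o ho; rcases hmul o ho with rfl | rfl <;> rcases hop' with rfl | rfl <;> decide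
            have hext := pvReduce_extend _ pendO pendS stack ops tA temp tacA tac left hq hlen hdrain
            have hstop : pvReduce (fun o => !decide (o = "(") && decide (pvPrec op ≤ pvPrec o))
                ops (left :: stack) temp tac = (ops, left :: stack, temp, tac) := by
              refine pvReduce_stop _ _ _ _ _ ?_
              rcases hOk with rfl | ⟨o, tl, rfl, ho⟩
              · exact Or.inl rfl
              · exact Or.inr ⟨o, tl, rfl, by
                  rcases ho with rfl | rfl | rfl <;> rcases hop' with rfl | rfl <;> decide⟩
            have hstep : pvSyStep (pendS ++ stack, pendO ++ ops, tA, tacA) op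
                = (left :: stack, op :: ops, temp, tac) :=
              pvSyStep_binop hopAny (by rw [hext, hstop])
            obtain ⟨C₂, hsplit₂, hfold₂⟩ :=
              ihF rest₀ temp tac right rest' temp' tac' (left :: stack) (op :: ops) hF
            obtain ⟨C₃, pS', pO', tA', tacA', hsplit₃, hfold₃, hmul', hlen', hdrain'⟩ :=
              ihTL (pvTempName temp') rest' (temp' + 1)
                (tac' ++ [pvTempName temp' ++ " = " ++ left ++ " " ++ op ++ " " ++ right])
                res rest tR tacR stack ops [right, left] [op] temp' tac' h hOk
                (by intro o ho; simp at ho; subst ho; exact hop')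
                (by simp)
                (by simp [pvReduce])
            refine ⟨op :: (C₂ ++ C₃), pS', pO', tA', tacA', ?_, ?_, hmul', hlen', hdrain'⟩
            · simp [hsplit₂, hsplit₃]
            · rw [List.foldl_cons, hstep, List.foldl_append, hfold₂]
              simpa using hfold₃
        · simp only [pvParseTLoop, hop, Bool.false_eq_true, if_false] at h
          rcases h with ⟨rfl, rfl, rfl, rfl⟩
          exact ⟨[], pendS, pendO, tA, tacA, by simp, by simp, hmul, hlen, hdrain⟩
    · -- parseT
      intro ts temp tac res rest tR tacR stack ops h hOk
      simp only [pvParseT] at h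
      cases hF : pvParseF n ts temp tac with
      | none => rw [hF] at h; simp at h
      | some q =>
        obtain ⟨left, rest₁, temp₁, tac₁⟩ := q
        rw [hF] at h
        obtain ⟨C₀, hs₀, hf₀⟩ := ihF ts temp tac left rest₁ temp₁ tac₁ stack ops hF
        obtain ⟨C₁, pS', pO', tA', tacA', hs₁, hf₁, hmul', hlen', hdrain'⟩ :=
          ihTL left rest₁ temp₁ tac₁ res rest tR tacR stack ops [left] [] temp₁ tac₁ h hOk
            (by intro o ho; simp at ho) (by simp) (by simp [pvReduce])
        refine ⟨C₀ ++ C₁, pS', pO', tA', tacA', ?_, ?_, hmul', hlen', hdrain'⟩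
        · simp [hs₀, hs₁]
        · rw [List.foldl_append, hf₀]
          simpa using hf₁
    · -- parseELoop
      intro left ts temp tac res rest tR tacR stack ops pendS pendO tA tacA h hOk hany hlen hdrain
      match ts with
      | [] =>
        simp [pvParseELoop] at h
        rcases h with ⟨rfl, rfl, rfl, rfl⟩
        exact ⟨[], pendS, pendO, tA, tacA, by simp, by simp, hany, hlen, hdrain⟩
      | op :: rest₀ =>
        by_cases hop : (op = "+" || op = "-") = true
        · have hop' : op = "+" ∨ op = "-" := by simpa using hop
          simp only [pvParseELoop, hop, if_true] at h
          cases hT : pvParseT n rest₀ temp tac with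
          | none => rw [hT] at h; simp at h
          | some q =>
            obtain ⟨right, rest', temp', tac'⟩ := q
            rw [hT] at h
            have hopAny : pvAnyOp op := by rcases hop' with rfl | rfl <;> simp [pvAnyOp]
            have hq : ∀ o ∈ pendO, (!decide (o = "(") && decide (pvPrec op ≤ pvPrec o)) = true := by
              intro o ho
              rcases hany o ho with rfl | rfl | rfl | rfl <;> rcases hop' with rfl | rfl <;> decide
            have hext := pvReduce_extend _ pendO pendS stack ops tA temp tacA tac left hq hlen hdrain
            have hstop : pvReduce (fun o => !decide (o = "(") && decide (pvPrec op ≤ pvPrec o))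
                ops (left :: stack) temp tac = (ops, left :: stack, temp, tac) := by
              refine pvReduce_stop _ _ _ _ _ ?_
              rcases hOk with rfl | ⟨tl, rfl⟩
              · exact Or.inl rfl
              · exact Or.inr ⟨"(", tl, rfl, by simp⟩
            have hstep : pvSyStep (pendS ++ stack, pendO ++ ops, tA, tacA) op
                = (left :: stack, op :: ops, temp, tac) :=
              pvSyStep_binop hopAny (by rw [hext, hstop])
            have hOkT : pvOkT (op :: ops) :=
              Or.inr ⟨op, ops, rfl, by rcases hop' with rfl | rfl <;> simp⟩
            obtain ⟨C₂, pendT, pendOT, tB, tacB, hsplit₂, hfold₂, hmulT, hlenT, hdrainT⟩ :=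
              ihT rest₀ temp tac right rest' temp' tac' (left :: stack) (op :: ops) hT hOkT
            have hdrainNew : pvReduce (fun _ => true) (pendOT ++ [op]) (pendT ++ [left]) tB tacB
                = ([], [pvTempName temp'], temp' + 1,
                   tac' ++ [pvTempName temp' ++ " = " ++ left ++ " " ++ op ++ " " ++ right]) := by
              rw [pvReduce_extend (fun _ => true) pendOT pendT [left] [op] tB temp' tacB tac'
                right (by intro o _; rfl) hlenT hdrainT]
              simp [pvReduce]
            obtain ⟨C₃, pS', pO', tA', tacA', hsplit₃, hfold₃, hany', hlen', hdrain'⟩ :=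
              ihEL (pvTempName temp') rest' (temp' + 1)
                (tac' ++ [pvTempName temp' ++ " = " ++ left ++ " " ++ op ++ " " ++ right])
                res rest tR tacR stack ops (pendT ++ [left]) (pendOT ++ [op]) tB tacB h hOk
                (by intro o ho
                    rcases List.mem_append.mp ho with hmem | hmem
                    · rcases hmulT o hmem with rfl | rfl <;> simp [pvAnyOp]
                    · simp at hmem; subst hmem; exact hopAny)
                (by simp at hlenT ⊢; omega) hdrainNew
            refine ⟨op :: (C₂ ++ C₃), pS', pO', tA', tacA', ?_, ?_, hany', hlen', hdrain'⟩
            · simp [hsplit₂, hsplit₃]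
            · rw [List.foldl_cons, hstep, List.foldl_append, hfold₂]
              have : pendT ++ left :: stack = (pendT ++ [left]) ++ stack := by simp
              rw [this]
              have h2 : pendOT ++ op :: ops = (pendOT ++ [op]) ++ ops := by simp
              rw [h2]
              exact hfold₃
        · simp only [pvParseELoop, hop, Bool.false_eq_true, if_false] at h
          rcases h with ⟨rfl, rfl, rfl, rfl⟩
          exact ⟨[], pendS, pendO, tA, tacA, by simp, by simp, hany, hlen, hdrain⟩
    · -- parseE
      intro ts temp tac res rest tR tacR stack ops h hOk
      simp only [pvParseE] at h
      cases hT : pvParseT n ts temp tac with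
      | none => rw [hT] at h; simp at h
      | some q =>
        obtain ⟨left, rest₁, temp₁, tac₁⟩ := q
        rw [hT] at h
        have hOkT : pvOkT ops := by
          rcases hOk with rfl | ⟨tl, rfl⟩
          · exact Or.inl rfl
          · exact Or.inr ⟨"(", tl, rfl, by simp⟩
        obtain ⟨C₀, pendT, pendOT, tB, tacB, hs₀, hf₀, hmulT, hlenT, hdrainT⟩ :=
          ihT ts temp tac left rest₁ temp₁ tac₁ stack ops hT hOkT
        obtain ⟨C₁, pS', pO', tA', tacA', hs₁, hf₁, hany', hlen', hdrain'⟩ :=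
          ihEL left rest₁ temp₁ tac₁ res rest tR tacR stack ops pendT pendOT tB tacB h hOk
            (by intro o ho; rcases hmulT o ho with rfl | rfl <;> simp [pvAnyOp])
            hlenT hdrainT
        refine ⟨C₀ ++ C₁, pS', pO', tA', tacA', ?_, ?_, hany', hlen', hdrain'⟩
        · simp [hs₀, hs₁]
        · rw [List.foldl_append, hf₀]
          exact hf₁

-- token-level image of the character automaton (proof device only)
def pvCheck : Option (Bool × Nat) → String → Option (Bool × Nat)
  | none, _ => none
  | some (expOperand, d), t =>
    if expOperand then
      if t = "(" then some (true, d + 1)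
      else if pvIsOpTok t then none
      else some (false, d)
    else
      if t = ")" then (if d = 0 then none else some (false, d - 1))
      else if t = "+" || t = "-" || t = "*" || t = "/" then some (true, d)
      else none

-- ---- completeness: a shape-checked token list parses, consuming everything ----
def pvPhi (ts : List String) (d : Nat) : Prop :=
  ts.foldl pvCheck (some (true, d)) = some (false, 0)
def pvPsi (ts : List String) (d : Nat) : Prop :=
  ts.foldl pvCheck (some (false, d)) = some (false, 0)
def pvNotMul (ts : List String) : Prop := ∀ c r, ts = c :: r → ¬ pvMul c
def pvNotAdd (ts : List String) : Prop := ∀ c r, ts = c :: r → ¬ (c = "+" ∨ c = "-")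

theorem pvNotMul_nil : pvNotMul [] := by
  intro c r h
  cases h

theorem pvNotAdd_nil : pvNotAdd [] := by
  intro c r h
  cases h

theorem pvFoldCheck_none (l : List String) : List.foldl pvCheck none l = none := by
  induction l with
  | nil => rfl
  | cons a l ih => exact ih

theorem pvComp : ∀ n : Nat,
    (∀ ts d temp tac, pvPhi ts d → 3 * ts.length ≤ n →
      ∃ res rest tR tacR, pvParseF n ts temp tac = some (res, rest, tR, tacR) ∧
        pvPsi rest d ∧ rest.length < ts.length) ∧
    (∀ ts d temp tac left, pvPsi ts d → 3 * ts.length + 1 ≤ n →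
      ∃ res rest tR tacR, pvParseTLoop n left ts temp tac = some (res, rest, tR, tacR) ∧
        pvPsi rest d ∧ rest.length ≤ ts.length ∧ pvNotMul rest) ∧
    (∀ ts d temp tac, pvPhi ts d → 3 * ts.length + 1 ≤ n →
      ∃ res rest tR tacR, pvParseT n ts temp tac = some (res, rest, tR, tacR) ∧
        pvPsi rest d ∧ rest.length < ts.length ∧ pvNotMul rest) ∧
    (∀ ts d temp tac left, pvPsi ts d → pvNotMul ts → 3 * ts.length + 1 ≤ n →
      ∃ res rest tR tacR, pvParseELoop n left ts temp tac = some (res, rest, tR, tacR) ∧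
        pvPsi rest d ∧ rest.length ≤ ts.length ∧ pvNotMul rest ∧ pvNotAdd rest) ∧
    (∀ ts d temp tac, pvPhi ts d → 3 * ts.length + 2 ≤ n →
      ∃ res rest tR tacR, pvParseE n ts temp tac = some (res, rest, tR, tacR) ∧
        pvPsi rest d ∧ rest.length < ts.length ∧ pvNotMul rest ∧ pvNotAdd rest) := by
  intro n
  induction n with
  | zero =>
    refine ⟨?_, ?_, ?_, ?_, ?_⟩ <;> intro ts d temp tac
    · intro hphi hfuel
      match ts, hfuel with
      | [], _ => simp [pvPhi] at hphi
    · intro left _ hfuel; omega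
    · intro hphi hfuel; omega
    · intro left _ _ hfuel; omega
    · intro hphi hfuel; omega
  | succ n ih =>
    obtain ⟨ihF, ihTL, ihT, ihEL, ihE⟩ := ih
    refine ⟨?_, ?_, ?_, ?_, ?_⟩
    · -- parseF
      intro ts d temp tac hphi hfuel
      match ts with
      | [] => simp [pvPhi] at hphi
      | t :: rest₀ =>
        by_cases ht : t = "("
        · subst ht
          have hphi' : pvPhi rest₀ (d + 1) := by
            simpa [pvPhi, pvCheck] using hphi
          obtain ⟨res, rest', tR, tacR, hE, hpsi', hlt', hnm, hna⟩ :=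
            ihE rest₀ (d + 1) temp tac hphi' (by simp at hfuel ⊢; omega)
          match rest' , hpsi', hnm, hna, hlt' with
          | [], hpsi', _, _, _ => simp [pvPsi] at hpsi'
          | c :: rest'', hpsi', hnm, hna, hlt' =>
            have hcnone : pvCheck (some (false, d + 1)) c ≠ none := by
              intro hno
              rw [pvPsi, List.foldl_cons, hno, pvFoldCheck_none] at hpsi'
              simp at hpsi'
            have hc : c = ")" := by
              by_contra hcc
              have h4 : c = "+" ∨ c = "-" ∨ c = "*" ∨ c = "/" := by
                by_contra hb
                simp only [not_or] at hb
                exact hcnone (by simp [pvCheck, hcc, hb.1, hb.2.1, hb.2.2.1, hb.2.2.2])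
              rcases h4 with rfl | rfl | rfl | rfl
              · exact hna _ _ rfl (Or.inl rfl)
              · exact hna _ _ rfl (Or.inr rfl)
              · exact hnm _ _ rfl (Or.inl rfl)
              · exact hnm _ _ rfl (Or.inr rfl)
            subst hc
            refine ⟨res, rest'', tR, tacR, ?_, ?_, ?_⟩
            · simp [pvParseF, hE]
            · have : pvCheck (some (false, d + 1)) ")" = some (false, d) := by
                simp [pvCheck]
              rw [pvPsi, List.foldl_cons, this] at hpsi'
              exact hpsi'
            · simp at hlt' ⊢; omega
        · by_cases hIs : pvIsOpTok t = true
          · exfalso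
            have : pvCheck (some (true, d)) t = none := by
              simp [pvCheck, ht, hIs]
            rw [pvPhi, List.foldl_cons, this, pvFoldCheck_none] at hphi
            simp at hphi
          · have hIs' : pvIsOpTok t = false := by simpa using hIs
            have hne : ¬(t = "+" || t = "-" || t = "*" || t = "/" || t = ")") = true := by
              intro hcon
              apply hIs
              simp [pvIsOpTok]
              simp at hcon
              tauto
            refine ⟨t, rest₀, temp, tac, ?_, ?_, by simp⟩
            · simp [pvParseF, ht, hne]
            · have : pvCheck (some (true, d)) t = some (false, d) := by
                simp [pvCheck, ht, hIs']
              rw [pvPhi, List.foldl_cons, this] at hphi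
              exact hphi
    · -- parseTLoop
      intro ts d temp tac left hpsi hfuel
      match ts with
      | [] =>
        exact ⟨left, [], temp, tac, by simp [pvParseTLoop], hpsi, le_refl _, pvNotMul_nil⟩
      | op :: rest₀ =>
        by_cases hmulop : (op = "*" || op = "/") = true
        · have hphi' : pvPhi rest₀ d := by
            rcases (by simpa using hmulop : op = "*" ∨ op = "/") with rfl | rfl <;>
              simpa [pvPhi, pvCheck] using hpsi
          obtain ⟨right, rest', tR', tacR', hF, hpsi'', hlt⟩ :=
            ihF rest₀ d temp tac hphi' (by simp at hfuel ⊢; omega)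
          obtain ⟨res, rest, tRR, tacRR, hTL, hpsiF, hleF, hnmF⟩ :=
            ihTL rest' d (tR' + 1)
              (tacR' ++ [pvTempName tR' ++ " = " ++ left ++ " " ++ op ++ " " ++ right])
              (pvTempName tR') hpsi'' (by simp at hfuel hlt ⊢; omega)
          refine ⟨res, rest, tRR, tacRR, ?_, hpsiF, ?_, hnmF⟩
          · simp [pvParseTLoop, hmulop, hF]
            exact hTL
          · simp at hlt ⊢; omega
        · refine ⟨left, op :: rest₀, temp, tac, ?_, hpsi, le_refl _, ?_⟩
          · simp [pvParseTLoop, hmulop]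
          · intro c r h
            cases h
            simp [pvMul]
            simp at hmulop
            tauto
    · -- parseT
      intro ts d temp tac hphi hfuel
      obtain ⟨left, rest₁, tR₁, tacR₁, hF, hpsi₁, hlt₁⟩ :=
        ihF ts d temp tac hphi (by omega)
      obtain ⟨res, rest, tR, tacR, hTL, hpsiR, hleR, hnmR⟩ :=
        ihTL rest₁ d tR₁ tacR₁ left hpsi₁ (by omega)
      refine ⟨res, rest, tR, tacR, ?_, hpsiR, by omega, hnmR⟩
      simp [pvParseT, hF]
      exact hTL
    · -- parseELoop
      intro ts d temp tac left hpsi hnm hfuel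
      match ts with
      | [] =>
        exact ⟨left, [], temp, tac, by simp [pvParseELoop], hpsi, le_refl _,
          pvNotMul_nil, pvNotAdd_nil⟩
      | op :: rest₀ =>
        by_cases haddop : (op = "+" || op = "-") = true
        · have hphi' : pvPhi rest₀ d := by
            rcases (by simpa using haddop : op = "+" ∨ op = "-") with rfl | rfl <;>
              simpa [pvPhi, pvCheck] using hpsi
          obtain ⟨right, rest', tR', tacR', hT, hpsi'', hlt, hnmT⟩ :=
            ihT rest₀ d temp tac hphi' (by simp at hfuel ⊢; omega)
          obtain ⟨res, rest, tRR, tacRR, hEL, hpsiF, hleF, hnmF, hnaF⟩ :=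
            ihEL rest' d (tR' + 1)
              (tacR' ++ [pvTempName tR' ++ " = " ++ left ++ " " ++ op ++ " " ++ right])
              (pvTempName tR') hpsi'' hnmT (by simp at hfuel hlt ⊢; omega)
          refine ⟨res, rest, tRR, tacRR, ?_, hpsiF, ?_, hnmF, hnaF⟩
          · simp [pvParseELoop, haddop, hT]
            exact hEL
          · simp at hlt ⊢; omega
        · refine ⟨left, op :: rest₀, temp, tac, ?_, hpsi, le_refl _, hnm, ?_⟩
          · simp [pvParseELoop, haddop]
          · intro c r h
            cases h
            simp at haddop
            tauto
    · -- parseE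
      intro ts d temp tac hphi hfuel
      obtain ⟨left, rest₁, tR₁, tacR₁, hT, hpsi₁, hlt₁, hnm₁⟩ :=
        ihT ts d temp tac hphi (by omega)
      obtain ⟨res, rest, tR, tacR, hEL, hpsiR, hleR, hnmR, hnaR⟩ :=
        ihEL rest₁ d tR₁ tacR₁ left hpsi₁ hnm₁ (by omega)
      refine ⟨res, rest, tR, tacR, ?_, hpsiR, by omega, hnmR, hnaR⟩
      simp [pvParseE, hT]
      exact hEL

-- ---- bridge: the character automaton of Pre_ equals the token automaton on tokenizer output ----
theorem pvCharFold_none (l : List Char) : List.foldl pvCheckChar none l = none := by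
  induction l with
  | nil => rfl
  | cons a l ih => exact ih

theorem pvDropWhile_head_false {p : Char → Bool} {l l' : List Char} {a : Char}
    (h : l.dropWhile p = a :: l') : p a = false := by
  induction l with
  | nil => simp at h
  | cons b t ih =>
    rw [List.dropWhile_cons] at h
    split_ifs at h with hb
    · exact ih h
    · cases h; simpa using hb

theorem pvOperandTok_ne (c : Char) (l : List Char) (c' : Char) (hc : pvSpecialChar c = false)
    (hc' : pvSpecialChar c' = true) : ¬ String.ofList (c :: l) = String.ofList [c'] := by
  intro h
  have h2 := congrArg String.toList h
  rw [String.toList_ofList, String.toList_ofList] at h2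
  obtain ⟨rfl, -⟩ := List.cons.injEq c l c' [] ▸ h2
  rw [hc'] at hc
  cases hc

theorem pvOperandTok (c : Char) (l : List Char) (hc : pvSpecialChar c = false) :
    pvIsOpTok (String.ofList (c :: l)) = false := by
  have h1 := pvOperandTok_ne c l '+' hc (by decide)
  have h2 := pvOperandTok_ne c l '-' hc (by decide)
  have h3 := pvOperandTok_ne c l '*' hc (by decide)
  have h4 := pvOperandTok_ne c l '/' hc (by decide)
  have h5 := pvOperandTok_ne c l '(' hc (by decide)
  have h6 := pvOperandTok_ne c l ')' hc (by decide)
  simp only [pvIsOpTok]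
  simp only [show ("+" : String) = String.ofList ['+'] from rfl,
    show ("-" : String) = String.ofList ['-'] from rfl,
    show ("*" : String) = String.ofList ['*'] from rfl,
    show ("/" : String) = String.ofList ['/'] from rfl,
    show ("(" : String) = String.ofList ['('] from rfl,
    show (")" : String) = String.ofList [')'] from rfl]
  simp [h1, h2, h3, h4, h5, h6]

theorem pvCharRun (run : List Char) (d : Nat) (h : ∀ c ∈ run, pvSpecialChar c = false) :
    List.foldl pvCheckChar (some (1, d)) run = some (1, d) := by
  induction run with
  | nil => rfl
  | cons a t ih =>
    rw [List.foldl_cons]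
    have ha := h a (by simp)
    have : pvCheckChar (some (1, d)) a = some (1, d) := by simp [pvCheckChar, ha]
    rw [this]
    exact ih (fun c hc => h c (by simp [hc]))

theorem pvS1S2 (c : Char) (d : Nat) (hc : pvSpecialChar c = true) :
    pvCheckChar (some (1, d)) c = pvCheckChar (some (2, d)) c := by
  simp only [pvCheckChar]
  simp [hc]

theorem pvBridge : ∀ (n : Nat) (e : List Char) (d : Nat), e.length ≤ n →
    pvToTok (List.foldl pvCheckChar (some (0, d)) e)
      = List.foldl pvCheck (some (true, d)) (pvTokenize e) ∧
    pvToTok (List.foldl pvCheckChar (some (2, d)) e)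
      = List.foldl pvCheck (some (false, d)) (pvTokenize e) := by
  intro n
  induction n with
  | zero =>
    intro e d h
    match e, h with
    | [], _ => exact ⟨by simp [pvTokenize, pvToTok], by simp [pvTokenize, pvToTok]⟩
  | succ n ih =>
    intro e d hlen
    match e with
    | [] => exact ⟨by simp [pvTokenize, pvToTok], by simp [pvTokenize, pvToTok]⟩
    | c :: rest =>
      have hlen' : rest.length ≤ n := by simp at hlen; omega
      by_cases hs : pvSpecialChar c = true
      · have htk : pvTokenize (c :: rest) = String.ofList [c] :: pvTokenize rest := by
          rw [pvTokenize]; simp [hs]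
        rw [htk]
        have hcs : ((((c = '+' ∨ c = '-') ∨ c = '*') ∨ c = '/') ∨ c = '(') ∨ c = ')' := by
          simpa [pvSpecialChar] using hs
        constructor
        · rw [List.foldl_cons, List.foldl_cons]
          rcases hcs with ((((rfl | rfl) | rfl) | rfl) | rfl) | rfl
          · rw [show pvCheckChar (some (0, d)) '+' = none from rfl,
              show pvCheck (some (true, d)) (String.ofList ['+']) = none from rfl,
              pvCharFold_none, pvFoldCheck_none]; rfl
          · rw [show pvCheckChar (some (0, d)) '-' = none from rfl,
              show pvCheck (some (true, d)) (String.ofList ['-']) = none from rfl,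
              pvCharFold_none, pvFoldCheck_none]; rfl
          · rw [show pvCheckChar (some (0, d)) '*' = none from rfl,
              show pvCheck (some (true, d)) (String.ofList ['*']) = none from rfl,
              pvCharFold_none, pvFoldCheck_none]; rfl
          · rw [show pvCheckChar (some (0, d)) '/' = none from rfl,
              show pvCheck (some (true, d)) (String.ofList ['/']) = none from rfl,
              pvCharFold_none, pvFoldCheck_none]; rfl
          · rw [show pvCheckChar (some (0, d)) '(' = some (0, d + 1) from rfl,
              show pvCheck (some (true, d)) (String.ofList ['(']) = some (true, d + 1) from rfl]
            exact (ih rest (d + 1) hlen').1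
          · rw [show pvCheckChar (some (0, d)) ')' = none from rfl,
              show pvCheck (some (true, d)) (String.ofList [')']) = none from rfl,
              pvCharFold_none, pvFoldCheck_none]; rfl
        · rw [List.foldl_cons, List.foldl_cons]
          rcases hcs with ((((rfl | rfl) | rfl) | rfl) | rfl) | rfl
          · rw [show pvCheckChar (some (2, d)) '+' = some (0, d) from rfl,
              show pvCheck (some (false, d)) (String.ofList ['+']) = some (true, d) from rfl]
            exact (ih rest d hlen').1
          · rw [show pvCheckChar (some (2, d)) '-' = some (0, d) from rfl,
              show pvCheck (some (false, d)) (String.ofList ['-']) = some (true, d) from rfl]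
            exact (ih rest d hlen').1
          · rw [show pvCheckChar (some (2, d)) '*' = some (0, d) from rfl,
              show pvCheck (some (false, d)) (String.ofList ['*']) = some (true, d) from rfl]
            exact (ih rest d hlen').1
          · rw [show pvCheckChar (some (2, d)) '/' = some (0, d) from rfl,
              show pvCheck (some (false, d)) (String.ofList ['/']) = some (true, d) from rfl]
            exact (ih rest d hlen').1
          · rw [show pvCheckChar (some (2, d)) '(' = none from rfl,
              show pvCheck (some (false, d)) (String.ofList ['(']) = none from rfl,
              pvCharFold_none, pvFoldCheck_none]; rfl
          · rw [show pvCheckChar (some (2, d)) ')' = (if d = 0 then none else some (2, d - 1)) from rfl,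
              show pvCheck (some (false, d)) (String.ofList [')'])
                = (if d = 0 then none else some (false, d - 1)) from rfl]
            by_cases hd : d = 0
            · rw [if_pos hd, if_pos hd, pvCharFold_none, pvFoldCheck_none]; rfl
            · rw [if_neg hd, if_neg hd]
              exact (ih rest (d - 1) hlen').2
      · have hs' : pvSpecialChar c = false := by simpa using hs
        have htk : pvTokenize (c :: rest) =
            String.ofList (c :: rest.takeWhile (fun x => !pvSpecialChar x)) ::
              pvTokenize (rest.dropWhile (fun x => !pvSpecialChar x)) := by
          rw [pvTokenize]; simp [hs']
        rw [htk]
        have hIs := pvOperandTok c (rest.takeWhile (fun x => !pvSpecialChar x)) hs'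
        have hnp : ¬ String.ofList (c :: rest.takeWhile (fun x => !pvSpecialChar x)) = "(" := by
          intro h
          exact pvOperandTok_ne c _ '(' hs' (by decide) h
        constructor
        · have hcp : ¬ c = '(' := by
            intro hcc; subst hcc; simp [pvSpecialChar] at hs'
          rw [List.foldl_cons,
            show pvCheckChar (some (0, d)) c = some (1, d) by simp [pvCheckChar, hs', hcp],
            List.foldl_cons,
            show pvCheck (some (true, d)) (String.ofList (c :: rest.takeWhile (fun x => !pvSpecialChar x)))
              = some (false, d) by simp [pvCheck, hnp, hIs]]
          have hsplitf : List.foldl pvCheckChar (some (1, d)) rest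
              = List.foldl pvCheckChar (some (1, d)) (rest.dropWhile (fun x => !pvSpecialChar x)) := by
            conv_lhs => rw [← List.takeWhile_append_dropWhile (p := fun x => !pvSpecialChar x) (l := rest)]
            rw [List.foldl_append,
              pvCharRun _ d (fun a ha => by simpa using List.mem_takeWhile_imp ha)]
          rw [hsplitf]
          cases hdw : rest.dropWhile (fun x => !pvSpecialChar x) with
          | nil => simp [pvTokenize, pvToTok]
          | cons c' r' =>
            have hc' : pvSpecialChar c' = true := by
              have := pvDropWhile_head_false hdw
              simpa using this
            rw [List.foldl_cons, pvS1S2 c' d hc', ← List.foldl_cons]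
            have hlr : (c' :: r').length ≤ n := by
              have h1 := List.length_dropWhile_le (fun x => !pvSpecialChar x) rest
              rw [hdw] at h1
              omega
            exact (ih (c' :: r') d hlr).2
        · rw [List.foldl_cons,
            show pvCheckChar (some (2, d)) c = none by simp [pvCheckChar, hs'],
            List.foldl_cons,
            show pvCheck (some (false, d)) (String.ofList (c :: rest.takeWhile (fun x => !pvSpecialChar x)))
              = none by
                simp only [pvIsOpTok, Bool.or_eq_false_iff, decide_eq_false_iff_not] at hIs
                simp [pvCheck, hIs.1.1.1.1.1, hIs.1.1.1.1.2, hIs.1.1.1.2, hIs.1.1.2, hIs.2],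
            pvCharFold_none, pvFoldCheck_none]
          rfl

-- ===== VERDICT (by name: the statement is the Claim_ definition above) =====
theorem infix_to_tac_spec : Claim_equal_infix_to_tac := by
  intro expression _ hpre
  unfold Spec_infix_to_tac
  unfold Pre_infix_to_tac at hpre
  obtain ⟨-, hvalid⟩ := hpre
  rcases hvalid with he | hacc
  · -- empty stripped input: both sides return []
    simp only [infix_to_tac, infix_to_tac_alt, he]
    simp [pvTokenize, pvReduce]
  · -- a shape-checked expression: parse it, then replay A's loop along the parse
    have hphi : pvPhi (pvTokenize (pvStrip expression)) 0 := by
      unfold pvPhi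
      rw [← (pvBridge (pvStrip expression).length (pvStrip expression) 0 le_rfl).1]
      exact hacc
    obtain ⟨res, rest, tR, tacR, hE, hpsi, hlt, hnm, hna⟩ :=
      (pvComp (3 * (pvTokenize (pvStrip expression)).length + 3)).2.2.2.2
        (pvTokenize (pvStrip expression)) 0 1 [] hphi (by omega)
    have hrest : rest = [] := by
      match rest, hpsi, hnm, hna with
      | [], _, _, _ => rfl
      | c :: r, hpsi, hnm, hna =>
        exfalso
        have h4 : ¬c = "+" ∧ ¬c = "-" ∧ ¬c = "*" ∧ ¬c = "/" := by
          refine ⟨?_, ?_, ?_, ?_⟩ <;> rintro rfl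
          · exact hna _ _ rfl (Or.inl rfl)
          · exact hna _ _ rfl (Or.inr rfl)
          · exact hnm _ _ rfl (Or.inl rfl)
          · exact hnm _ _ rfl (Or.inr rfl)
        have hnone : pvCheck (some (false, 0)) c = none := by
          by_cases hc : c = ")"
          · simp [pvCheck, hc]
          · simp [pvCheck, hc, h4.1, h4.2.1, h4.2.2.1, h4.2.2.2]
        rw [pvPsi, List.foldl_cons, hnone, pvFoldCheck_none] at hpsi
        simp at hpsi
    subst hrest
    obtain ⟨C, pendS, pendO, tA, tacA, hsplit, hfold, hany, hlen, hdrain⟩ :=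
      (pvSim (3 * (pvTokenize (pvStrip expression)).length + 3)).2.2.2.2
        (pvTokenize (pvStrip expression)) 1 [] res [] tR tacR [] [] hE (Or.inl rfl)
    have hC : C = pvTokenize (pvStrip expression) := by simpa using hsplit.symm
    subst hC
    simp only [List.append_nil] at hfold
    have hne : pvTokenize (pvStrip expression) ≠ [] := by
      intro h
      rw [h] at hphi
      unfold pvPhi at hphi
      simp only [List.foldl_nil, Option.some.injEq, Prod.mk.injEq] at hphi
      exact Bool.true_eq_false.mp hphi.1
    obtain ⟨t, ts', htk⟩ : ∃ t ts', pvTokenize (pvStrip expression) = t :: ts' := by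
      cases h : pvTokenize (pvStrip expression) with
      | nil => exact absurd h hne
      | cons a l => exact ⟨a, l, rfl⟩
    rw [htk] at hE hfold
    simp only [infix_to_tac, infix_to_tac_alt, htk]
    rw [hfold, hdrain, hE]
    simp
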